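-- pv_equiv track=rewrite | github.com/instkoni/sns-content-automation | note-thumbnail-automation/.agent/skills/note-thumbnail-generator/scripts/generate_thumbnail.py | _parse_colored_text
-- ===== SOURCE A (Python) =====
-- def _parse_colored_text(text, base_color, highlight_color):
--     """テキストを強調表示用の (char, color) リストに変換"""
--     result = []
--     is_highlight = False
--
--     # `*` で囲まれた部分を強調色にする
--     # 文字列を一文字ずつ処理
--     for char in text:
--         if char == "*":
--             # フラグを反転させる（*自体は表示しない）
--             is_highlight = not is_highlight
--             continue
--
--         color = highlight_color if is_highlight else base_color
--         result.append({'char': char, 'color': color})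
--
--     return result
-- ===== SOURCE B (Python) =====
-- def _parse_colored_text(text, base_color, highlight_color):
--     """Split on '*' first: odd-indexed segments are highlighted, then emit one dict per char."""
--     result = []
--     for i, segment in enumerate(text.split('*')):
--         color = highlight_color if i % 2 == 1 else base_color
--         for char in segment:
--             result.append({'char': char, 'color': color})
--     return result
-- ===== Notes on version B (the rewrite author's own statement) =====
-- stated objective: idiomatic
-- what changed: B splits the text on '*' up front and colours whole segments by index parity (odd = highlight) in a nested pass, instead of A's char-by-char scan that toggles a boolean flag.
import Mathlib
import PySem

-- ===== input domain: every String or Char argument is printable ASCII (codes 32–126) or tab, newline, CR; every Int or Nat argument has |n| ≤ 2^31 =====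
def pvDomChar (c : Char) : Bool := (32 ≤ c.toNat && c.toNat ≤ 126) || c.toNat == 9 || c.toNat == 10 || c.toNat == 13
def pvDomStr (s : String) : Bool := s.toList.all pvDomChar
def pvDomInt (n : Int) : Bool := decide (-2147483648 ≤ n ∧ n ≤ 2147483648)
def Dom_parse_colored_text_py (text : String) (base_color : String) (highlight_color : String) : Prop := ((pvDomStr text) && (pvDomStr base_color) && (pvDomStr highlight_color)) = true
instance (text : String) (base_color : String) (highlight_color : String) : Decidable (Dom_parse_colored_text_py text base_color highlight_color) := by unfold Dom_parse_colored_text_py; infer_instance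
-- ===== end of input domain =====

-- B replaces A's char-by-char boolean-toggle scan by split-on-'*' plus a nested pass colouring segments by index parity (idiomatic decomposition; same cost).

-- ===== PORT A =====
-- A: scan the characters, '*' toggles the highlight flag and is dropped, every other char emits a dict.
def parse_colored_text_py (text : String) (base_color : String) (highlight_color : String) : List (List (String × String)) :=
  (text.toList.foldl
    (fun (st : List (List (String × String)) × Bool) char =>
      if char = '*' then (st.1, !st.2)
      else (st.1 ++ [[("char", String.ofList [char]), ("color", if st.2 then highlight_color else base_color)]], st.2))
    ([], false)).1

-- ===== PORT B =====
-- B: segments = text.split('*'); for i, segment in enumerate(segments): colour by parity of i, emit one dict per char.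
def parse_colored_text_py_alt (text : String) (base_color : String) (highlight_color : String) : List (List (String × String)) :=
  (PySem.List.enumerate (PySem.Chars.splitOn text.toList ['*'])).foldl
    (fun result p =>
      p.2.foldl
        (fun r char =>
          r ++ [[("char", String.ofList [char]), ("color", if PySem.Int.mod p.1 2 = 1 then highlight_color else base_color)]])
        result)
    []

-- ===== PRECONDITION & SPEC =====
def Spec_parse_colored_text_py (text : String) (base_color : String) (highlight_color : String) (out : List (List (String × String))) : Prop := out = parse_colored_text_py_alt text base_color highlight_color
instance (text : String) (base_color : String) (highlight_color : String) (out : List (List (String × String))) : Decidable (Spec_parse_colored_text_py text base_color highlight_color out) := by unfold Spec_parse_colored_text_py; infer_instance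

-- ===== CLAIM (what is proved, stated in full; the proofs are below) =====
def Claim_equal_parse_colored_text_py : Prop := ∀ (text : String) (base_color : String) (highlight_color : String), Dom_parse_colored_text_py text base_color highlight_color → Spec_parse_colored_text_py text base_color highlight_color (parse_colored_text_py text base_color highlight_color)

-- ===== LEMMAS AND PROOFS =====

-- Specification-side helpers (proof only).
def pvSplit : List Char → List (List Char)
  | [] => [[]]
  | c :: cs => if c = '*' then [] :: pvSplit cs else (pvSplit cs).modifyHead (c :: ·)

def pvRun (base hi : String) : Bool → List Char → List (List (String × String))
  | _, [] => []
  | b, c :: cs =>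
    if c = '*' then pvRun base hi (!b) cs
    else [("char", String.ofList [c]), ("color", if b then hi else base)] :: pvRun base hi b cs

def pvRender (base hi : String) : Bool → List (List Char) → List (List (String × String))
  | _, [] => []
  | b, seg :: rest =>
    seg.map (fun c => [("char", String.ofList [c]), ("color", if b then hi else base)]) ++ pvRender base hi (!b) rest

theorem pvSplit_ne_nil (cs : List Char) : pvSplit cs ≠ [] := by
  cases cs with
  | nil => simp [pvSplit]
  | cons c cs =>
    simp only [pvSplit]
    split_ifs
    · simp
    · cases h : pvSplit cs with
      | nil => exact absurd h (pvSplit_ne_nil cs)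
      | cons a t => simp [List.modifyHead]

theorem pvA_fold (base hi : String) (cs : List Char) (acc : List (List (String × String))) (b : Bool) :
    (cs.foldl
      (fun (st : List (List (String × String)) × Bool) char =>
        if char = '*' then (st.1, !st.2)
        else (st.1 ++ [[("char", String.ofList [char]), ("color", if st.2 then hi else base)]], st.2))
      (acc, b)).1 = acc ++ pvRun base hi b cs := by
  induction cs generalizing acc b with
  | nil => simp [pvRun]
  | cons c cs ih =>
    by_cases h : c = '*'
    · simp [pvRun, h, ih]
    · simp [pvRun, h, ih, List.append_assoc]

theorem pvGo_eq (cs : List Char) (fuel : Nat) (cur : List Char) (acc : List (List Char))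
    (hf : cs.length ≤ fuel) :
    PySem.Chars.splitOn.go ['*'] fuel cs cur acc
      = acc.reverse ++ (pvSplit cs).modifyHead (cur.reverse ++ ·) := by
  induction cs generalizing fuel cur acc with
  | nil =>
    cases fuel with
    | zero => simp [PySem.Chars.splitOn.go, pvSplit]
    | succ n => simp [PySem.Chars.splitOn.go, pvSplit]
  | cons c cs ih =>
    cases fuel with
    | zero => simp at hf
    | succ n =>
      by_cases h : c = '*'
      · subst h
        have : PySem.Chars.splitOn.go ['*'] (n+1) ('*' :: cs) cur acc
            = PySem.Chars.splitOn.go ['*'] n cs [] (cur.reverse :: acc) := by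
          simp [PySem.Chars.splitOn.go, List.isPrefixOf]
        rw [this, ih n [] _ (by simpa using hf)]
        simp [pvSplit]
        cases hs : pvSplit cs with
        | nil => exact absurd hs (pvSplit_ne_nil cs)
        | cons a t => simp [List.modifyHead]
      · have : PySem.Chars.splitOn.go ['*'] (n+1) (c :: cs) cur acc
            = PySem.Chars.splitOn.go ['*'] n cs (c :: cur) acc := by
          simp [PySem.Chars.splitOn.go, List.isPrefixOf]
          exact fun hc => absurd hc.symm h
        rw [this, ih n (c :: cur) acc (by simpa using hf)]
        simp [pvSplit, h]
        cases hs : pvSplit cs with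
        | nil => exact absurd hs (pvSplit_ne_nil cs)
        | cons a t => simp [List.modifyHead]

theorem pvSplitOn_eq (cs : List Char) : PySem.Chars.splitOn cs ['*'] = pvSplit cs := by
  have := pvGo_eq cs (cs.length + 1) [] [] (by omega)
  simp only [PySem.Chars.splitOn]
  rw [this]
  cases hs : pvSplit cs with
  | nil => exact absurd hs (pvSplit_ne_nil cs)
  | cons a t => simp [List.modifyHead]

theorem pvRun_eq_render (base hi : String) (cs : List Char) (b : Bool) :
    pvRun base hi b cs = pvRender base hi b (pvSplit cs) := by
  induction cs generalizing b with
  | nil => simp [pvRun, pvSplit, pvRender]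
  | cons c cs ih =>
    by_cases h : c = '*'
    · simp [pvRun, pvSplit, pvRender, h, ih]
    · cases hs : pvSplit cs with
      | nil => exact absurd hs (pvSplit_ne_nil cs)
      | cons seg rest =>
        simp [pvRun, pvSplit, h, ih, hs, List.modifyHead, pvRender]

theorem pvB_fold (base hi : String) (segs : List (List Char)) (k : Int) (hk : 0 ≤ k)
    (res : List (List (String × String))) :
    (PySem.List.enumerate segs k).foldl
      (fun result p =>
        p.2.foldl
          (fun r char =>
            r ++ [[("char", String.ofList [char]), ("color", if PySem.Int.mod p.1 2 = 1 then hi else base)]])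
          result)
      res
    = res ++ pvRender base hi (decide (PySem.Int.mod k 2 = 1)) segs := by
  induction segs generalizing k res with
  | nil => simp [PySem.List.enumerate, pvRender]
  | cons seg rest ih =>
    simp only [PySem.List.enumerate, List.foldl_cons]
    rw [PySem.List.foldl_append_singleton_eq_map, ih (k + 1) (by omega)]
    have hm : PySem.Int.mod k 2 = k % 2 := PySem.Int.mod_eq_emod_of_pos (by omega)
    have hm1 : PySem.Int.mod (k + 1) 2 = (k + 1) % 2 := PySem.Int.mod_eq_emod_of_pos (by omega)
    have hflip : (decide (PySem.Int.mod (k + 1) 2 = 1)) = !(decide (PySem.Int.mod k 2 = 1)) := by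
      rw [hm, hm1]
      by_cases h : k % 2 = 1
      · have : (k + 1) % 2 = 0 := by omega
        simp [h, this]
      · have : (k + 1) % 2 = 1 := by omega
        simp [h, this]
    rw [hflip]
    by_cases hb : PySem.Int.mod k 2 = 1 <;> simp [pvRender, List.append_assoc]

-- ===== VERDICT (by name: the statement is the Claim_ definition above) =====
theorem parse_colored_text_py_spec : Claim_equal_parse_colored_text_py := by
  intro text base hi _
  show parse_colored_text_py text base hi = parse_colored_text_py_alt text base hi
  unfold parse_colored_text_py parse_colored_text_py_alt
  rw [pvA_fold base hi text.toList [] false,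
      pvB_fold base hi (PySem.Chars.splitOn text.toList ['*']) 0 (by omega) [],
      pvSplitOn_eq, pvRun_eq_render]
  norm_num [PySem.Int.mod]
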